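-- pv_equiv track=rewrite | github.com/zhenfelix/OnlineJudgeCodings | LeetCode/2262. Total Appeal of A String/solution.py | appealSum
-- ===== SOURCE A (Python) =====
-- def appealSum(s: str) -> int:
--     mp = dict()
--     pre, tot = 0, 0
--     for i, ch in enumerate(s):
--         if ch not in mp:
--             pre += i+1
--             tot += pre
--         else:
--             pre += i-mp[ch]
--             tot += pre
--         mp[ch] = i
--     return tot
-- ===== SOURCE B (Python) =====
-- def appealSum(s: str) -> int:
--     n = len(s)
--     prev = {}
--     total = 0
--     for i, ch in enumerate(s):
--         total += (i - prev.get(ch, -1)) * (n - i)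
--         prev[ch] = i
--     return total
-- ===== Notes on version B (the rewrite author's own statement) =====
-- stated objective: alternative
-- what changed: Replaces A's incremental prefix-appeal accumulation (pre/tot pair updated additively each step) by a direct combinatorial count: each position i contributes (i - prev_occurrence) * (n - i) substrings in which it is the last occurrence of its character, summed in one pass with a single accumulator.
import Mathlib
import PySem

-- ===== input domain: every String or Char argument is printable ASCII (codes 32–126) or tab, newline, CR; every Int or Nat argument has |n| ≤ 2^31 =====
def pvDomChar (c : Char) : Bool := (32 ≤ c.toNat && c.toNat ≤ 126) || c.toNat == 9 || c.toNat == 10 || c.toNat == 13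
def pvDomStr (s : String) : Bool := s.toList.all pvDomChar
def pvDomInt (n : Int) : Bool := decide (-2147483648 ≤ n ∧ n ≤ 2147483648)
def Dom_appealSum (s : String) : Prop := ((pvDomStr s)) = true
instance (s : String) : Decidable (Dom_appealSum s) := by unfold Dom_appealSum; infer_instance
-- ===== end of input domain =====

-- B replaces A's incremental prefix-appeal accumulator pair (pre, tot) by a direct
-- per-position combinatorial count (i - prev) * (n - i); alternative decomposition, same cost.

-- ===== PORT A =====
-- the for-loop of A: state (mp, pre, tot), index i over enumerate(s)
def appealSumGo (cs : List Char) (i : Int) (mp : PySem.Dict Char Int) (pre tot : Int) : Int :=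
  match cs with
  | [] => tot
  | c :: rest =>
    if mp.contains c = false then
      appealSumGo rest (i + 1) (mp.insert c i) (pre + (i + 1)) (tot + (pre + (i + 1)))
    else
      -- mp[ch] is guarded by the membership test, so getD is exact here
      appealSumGo rest (i + 1) (mp.insert c i)
        (pre + (i - mp.getD c 0)) (tot + (pre + (i - mp.getD c 0)))

def appealSum (s : String) : Int :=
  appealSumGo s.toList 0 PySem.Dict.empty 0 0

-- ===== PORT B =====
-- the for-loop of B: state (prev, total), fixed n = len(s)
def appealSumAltGo (cs : List Char) (i n : Int) (prev : PySem.Dict Char Int) (total : Int) : Int :=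
  match cs with
  | [] => total
  | c :: rest =>
    appealSumAltGo rest (i + 1) n (prev.insert c i)
      (total + (i - prev.getD c (-1)) * (n - i))

def appealSum_alt (s : String) : Int :=
  appealSumAltGo s.toList 0 (PySem.Str.len s) PySem.Dict.empty 0

-- ===== PRECONDITION & SPEC =====
def Spec_appealSum (s : String) (out : Int) : Prop := out = appealSum_alt s
instance (s : String) (out : Int) : Decidable (Spec_appealSum s out) := by unfold Spec_appealSum; infer_instance

-- ===== CLAIM (what is proved, stated in full; the proofs are below) =====
def Claim_equal_appealSum : Prop := ∀ (s : String), Dom_appealSum s → Spec_appealSum s (appealSum s)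

-- ===== LEMMAS AND PROOFS =====

-- Core invariant: with identical dict state and n = i + |cs|, A's loop result equals
-- B's loop started from accumulator tot + pre * |cs| (pre is re-counted once per remaining step).
theorem appealSumGo_eq_alt (cs : List Char) : ∀ (i : Int) (d : PySem.Dict Char Int)
    (pre tot n : Int), n = i + cs.length →
    appealSumGo cs i d pre tot = appealSumAltGo cs i n d (tot + pre * cs.length) := by
  induction cs with
  | nil => intro i d pre tot n _; simp [appealSumGo, appealSumAltGo]
  | cons c rest ih =>
    intro i d pre tot n hn
    by_cases hc : d.contains c = false
    · have hget : d.getD c (-1) = -1 := PySem.Dict.getD_of_not_contains d (-1) hc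
      rw [appealSumGo, appealSumAltGo, if_pos hc, hget,
        ih (i + 1) (d.insert c i) (pre + (i + 1)) (tot + (pre + (i + 1))) n
          (by simp at hn ⊢; omega)]
      congr 1
      simp only [List.length_cons] at hn ⊢
      push_cast at hn ⊢
      subst hn; ring
    · have hc' : d.contains c = true := by revert hc; cases d.contains c <;> simp
      obtain ⟨v, hv⟩ : ∃ v, d.get? c = some v := by
        have := PySem.Dict.contains_eq_isSome_get? (d := d) (k := c)
        rw [hc'] at this
        cases h : d.get? c with
        | none => rw [h] at this; simp at this
        | some v => exact ⟨v, rfl⟩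
      have h0 : d.getD c 0 = v := PySem.Dict.getD_of_get?_eq_some d 0 hv
      have h1 : d.getD c (-1) = v := PySem.Dict.getD_of_get?_eq_some d (-1) hv
      rw [appealSumGo, appealSumAltGo, if_neg hc, h0, h1,
        ih (i + 1) (d.insert c i) (pre + (i - v)) (tot + (pre + (i - v))) n
          (by simp at hn ⊢; omega)]
      congr 1
      simp only [List.length_cons] at hn ⊢
      push_cast at hn ⊢
      subst hn; ring

-- ===== VERDICT (by name: the statement is the Claim_ definition above) =====
theorem appealSum_spec : Claim_equal_appealSum := by
  intro s _
  unfold Spec_appealSum appealSum appealSum_alt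
  rw [appealSumGo_eq_alt s.toList 0 PySem.Dict.empty 0 0 (PySem.Str.len s)
    (by simp [PySem.Str.len])]
  norm_num
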